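-- pv_equiv track=rewrite | github.com/SaierLaboratory/TCDBtools | bin/tmalignparser.py | get_aligned_contig_sequences
-- ===== SOURCE A (Python) =====
-- def get_aligned_contig_sequences(alignmentlines, minlength=4):
-- 	lastmidline = None
-- 	qcontigs = []
-- 	tcontigs = []
-- 	permitted = ':.'
-- 	for qresn, midline, tresn in zip(*alignmentlines):
-- 		if lastmidline is None and midline not in permitted: pass
-- 		elif lastmidline is None and midline in permitted:
-- 			qcontigs.append(qresn)
-- 			tcontigs.append(tresn)
-- 		elif lastmidline in permitted and midline in permitted:
-- 			try: qcontigs[-1] += qresn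
-- 			except IndexError: qcontigs.append(qresn)
-- 			try: tcontigs[-1] += tresn
-- 			except IndexError: tcontigs.append(tresn)
-- 		elif (lastmidline not in permitted) and (midline in permitted):
-- 			qcontigs.append(qresn)
-- 			tcontigs.append(tresn)
-- 		lastmidline = midline
-- 	filtered_qcontigs = []
-- 	filtered_tcontigs = []
-- 	for qcontig in qcontigs:
-- 		if len(qcontig) >= minlength: filtered_qcontigs.append(qcontig)
-- 	for tcontig in tcontigs:
-- 		if len(tcontig) >= minlength: filtered_tcontigs.append(tcontig)
-- 	return filtered_qcontigs, filtered_tcontigs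
-- ===== SOURCE B (Python) =====
-- def get_aligned_contig_sequences(alignmentlines, minlength=4):
--     cols = list(zip(*alignmentlines))
--     runs = []
--     i, n = 0, len(cols)
--     while i < n:
--         if cols[i][1] in ':.':
--             j = i + 1
--             while j < n and cols[j][1] in ':.':
--                 j += 1
--             runs.append(cols[i:j])
--             i = j
--         else:
--             i += 1
--     qcontigs = [''.join(c[0] for c in r) for r in runs]
--     tcontigs = [''.join(c[2] for c in r) for r in runs]
--     return ([q for q in qcontigs if len(q) >= minlength],
--             [t for t in tcontigs if len(t) >= minlength])
-- ===== Notes on version B (the rewrite author's own statement) =====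
-- stated objective: alternative
-- what changed: Replaces the element-wise state machine (tracking the previous midline char and mutating the last contig) with a run-based scanner that finds each maximal run of permitted columns with an inner two-pointer scan and joins each run at once.
import Mathlib
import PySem

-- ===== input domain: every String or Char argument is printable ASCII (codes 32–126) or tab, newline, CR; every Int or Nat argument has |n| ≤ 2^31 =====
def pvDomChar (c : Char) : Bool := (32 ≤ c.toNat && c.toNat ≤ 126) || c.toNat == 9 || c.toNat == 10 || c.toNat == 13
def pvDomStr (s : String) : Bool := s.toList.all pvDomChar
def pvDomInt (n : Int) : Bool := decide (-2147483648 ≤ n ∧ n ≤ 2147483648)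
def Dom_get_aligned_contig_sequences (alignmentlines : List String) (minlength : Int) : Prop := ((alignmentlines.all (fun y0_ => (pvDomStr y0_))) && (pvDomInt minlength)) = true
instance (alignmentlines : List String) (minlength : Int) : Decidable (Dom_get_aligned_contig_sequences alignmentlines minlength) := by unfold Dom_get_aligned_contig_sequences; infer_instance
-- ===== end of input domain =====

-- B replaces A's previous-midline state machine by a run-based scanner (maximal runs of
-- permitted columns, each joined at once); alternative decomposition, same cost.

-- shared input decoding: the column triples produced by zip(*alignmentlines)
-- (under Pre_ this is exact: either exactly 3 lines, or the zip is empty)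
def pvCols (alignmentlines : List String) : List (Char × Char × Char) :=
  match alignmentlines with
  | [q, m, t] => q.toList.zip (m.toList.zip t.toList)
  | _ => []

-- midline in ':.'
def pvPerm (c : Char) : Bool := c == ':' || c == '.'

-- ===== PORT A =====
-- qcontigs[-1] += c  with the try/except IndexError fallback (append if empty)
def pvExtendLast : List (List Char) → Char → List (List Char)
  | [], c => [[c]]
  | [x], c => [x ++ [c]]
  | x :: y :: xs, c => x :: pvExtendLast (y :: xs) c

-- one iteration of A's loop body, branches in source order; strings kept as List Char
def pvStepA (st : Option Char × List (List Char) × List (List Char))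
    (col : Char × Char × Char) : Option Char × List (List Char) × List (List Char) :=
  let last := st.1; let qc := st.2.1; let tc := st.2.2
  let q := col.1; let m := col.2.1; let t := col.2.2
  if last.isNone && !pvPerm m then (some m, qc, tc)
  else if last.isNone && pvPerm m then (some m, qc ++ [[q]], tc ++ [[t]])
  else if (match last with | some c => pvPerm c | none => false) && pvPerm m then
    (some m, pvExtendLast qc q, pvExtendLast tc t)
  else if !(match last with | some c => pvPerm c | none => false) && pvPerm m then
    (some m, qc ++ [[q]], tc ++ [[t]])
  else (some m, qc, tc)

def get_aligned_contig_sequences (alignmentlines : List String) (minlength : Int) : List String × List String :=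
  let st := (pvCols alignmentlines).foldl pvStepA (none, [], [])
  (((st.2.1.filter (fun c => decide (minlength ≤ (c.length : Int)))).map String.mk),
   ((st.2.2.filter (fun c => decide (minlength ≤ (c.length : Int)))).map String.mk))

-- ===== PORT B =====
-- the run scanner: each maximal run of permitted columns, found by an inner scan
def pvRunsB : List (Char × Char × Char) → List (List (Char × Char × Char))
  | [] => []
  | c :: cs =>
    if pvPerm c.2.1 then
      (c :: cs.takeWhile (fun x => pvPerm x.2.1)) :: pvRunsB (cs.dropWhile (fun x => pvPerm x.2.1))
    else pvRunsB cs
  termination_by l => l.length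
  decreasing_by
    all_goals simp [Nat.lt_succ_of_le (List.length_dropWhile_le (fun x => pvPerm x.2.1) cs)]

-- B's view of zip(*alignmentlines): tuples indexed at 0,1,2, truncated to the shortest line
def pvColsB (alignmentlines : List String) : List (Char × Char × Char) :=
  match alignmentlines with
  | q :: m :: t :: _ =>
      let n := alignmentlines.foldl (fun a s => Nat.min a s.toList.length) q.toList.length
      (q.toList.take n).zip ((m.toList.take n).zip (t.toList.take n))
  | _ => []

def get_aligned_contig_sequences_alt (alignmentlines : List String) (minlength : Int) : List String × List String :=
  let runs := pvRunsB (pvColsB alignmentlines)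
  let qcontigs := runs.map (fun r => r.map (·.1))
  let tcontigs := runs.map (fun r => r.map (·.2.2))
  (((qcontigs.filter (fun c => decide (minlength ≤ (c.length : Int)))).map String.mk),
   ((tcontigs.filter (fun c => decide (minlength ≤ (c.length : Int)))).map String.mk))

-- ===== PRECONDITION & SPEC =====
-- A unpacks each element of zip(*alignmentlines) into 3 variables: with exactly 3 lines it
-- returns normally, and with an empty zip (no lines, or some empty line) the loop never runs;
-- on every other input A raises ValueError, so those inputs are excluded.
def Pre_get_aligned_contig_sequences (alignmentlines : List String) (minlength : Int) : Prop :=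
  alignmentlines.length = 3 ∨ alignmentlines = [] ∨ (∃ s ∈ alignmentlines, s = "")
instance (alignmentlines : List String) (minlength : Int) : Decidable (Pre_get_aligned_contig_sequences alignmentlines minlength) := by unfold Pre_get_aligned_contig_sequences; infer_instance
def pvWitness_get_aligned_contig_sequences : List String × Int := (["ABCDEF", "::. .:", "UVWXYZ"], 2)

def Spec_get_aligned_contig_sequences (alignmentlines : List String) (minlength : Int) (out : List String × List String) : Prop := out = get_aligned_contig_sequences_alt alignmentlines minlength
instance (alignmentlines : List String) (minlength : Int) (out : List String × List String) : Decidable (Spec_get_aligned_contig_sequences alignmentlines minlength out) := by unfold Spec_get_aligned_contig_sequences; infer_instance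

-- ===== CLAIM (what is proved, stated in full; the proofs are below) =====
def Claim_equal_get_aligned_contig_sequences : Prop := ∀ (alignmentlines : List String) (minlength : Int), Dom_get_aligned_contig_sequences alignmentlines minlength → Pre_get_aligned_contig_sequences alignmentlines minlength → Spec_get_aligned_contig_sequences alignmentlines minlength (get_aligned_contig_sequences alignmentlines minlength)

-- ===== LEMMAS AND PROOFS =====

lemma pv_foldl_min_le_init (l : List Nat) (a : Nat) : l.foldl Nat.min a ≤ a := by
  induction l generalizing a with
  | nil => simp
  | cons b tl ih => exact le_trans (ih (Nat.min a b)) (Nat.min_le_left a b)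

lemma pv_foldl_min_zero (l : List Nat) (a : Nat) (h : (0 : Nat) ∈ l) : l.foldl Nat.min a = 0 := by
  induction l generalizing a with
  | nil => simp at h
  | cons b tl ih =>
    rcases List.mem_cons.mp h with rfl | h0
    · exact Nat.le_zero.mp (le_trans (pv_foldl_min_le_init tl (Nat.min a 0)) (Nat.min_le_right a 0))
    · exact ih (Nat.min a b) h0

lemma pv_zip_take_min (q m t : List Char) (n : Nat)
    (hn : n = Nat.min (Nat.min q.length m.length) t.length) :
    (q.take n).zip ((m.take n).zip (t.take n)) = q.zip (m.zip t) := by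
  subst hn
  apply List.ext_getElem
  · simp
  · intro i h1 h2
    simp [List.getElem_zip, List.getElem_take]

-- under Pre_, B's column decoding agrees with A's
lemma pv_colsB_eq (alignmentlines : List String) (minlength : Int)
    (hpre : Pre_get_aligned_contig_sequences alignmentlines minlength) :
    pvColsB alignmentlines = pvCols alignmentlines := by
  rcases hpre with h3 | rfl | ⟨s, hs, rfl⟩
  · obtain ⟨a, b, c, rfl⟩ := List.length_eq_three.mp h3
    show (a.toList.take _).zip ((b.toList.take _).zip (c.toList.take _)) = _
    exact pv_zip_take_min _ _ _ _ (by simp [Nat.min_assoc])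
  · rfl
  · match alignmentlines, hs with
    | [], _ => rfl
    | [a], _ => rfl
    | [a, b], _ => rfl
    | [a, b, c], hm =>
      rcases (by simpa using hm : a = "" ∨ b = "" ∨ c = "") with rfl | rfl | rfl <;>
        simp [pvColsB, pvCols]
    | a :: b :: c :: d :: rest, hm =>
      have hn : (a :: b :: c :: d :: rest).foldl (fun x s => Nat.min x s.toList.length) a.toList.length = 0 := by
        simpa [List.foldl_map] using
          pv_foldl_min_zero ((a :: b :: c :: d :: rest).map (fun s => s.toList.length))
            a.toList.length (List.mem_map.mpr ⟨"", hm, by simp⟩)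
      show (a.toList.take ((a :: b :: c :: d :: rest).foldl (fun x s => Nat.min x s.toList.length) a.toList.length)).zip
          ((b.toList.take ((a :: b :: c :: d :: rest).foldl (fun x s => Nat.min x s.toList.length) a.toList.length)).zip
            (c.toList.take ((a :: b :: c :: d :: rest).foldl (fun x s => Nat.min x s.toList.length) a.toList.length)))
          = pvCols (a :: b :: c :: d :: rest)
      rw [hn]
      rfl

def pvPermOpt : Option Char → Bool
  | none => false
  | some c => pvPerm c

lemma pvExtendLast_append (xs : List (List Char)) (x : List Char) (c : Char) :
    pvExtendLast (xs ++ [x]) c = xs ++ [x ++ [c]] := by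
  induction xs with
  | nil => simp [pvExtendLast]
  | cons a as ih =>
    cases as with
    | nil => simp [pvExtendLast]
    | cons b bs => simpa [pvExtendLast] using ih

def pvProjQ (r : List (Char × Char × Char)) : List Char := r.map (·.1)
def pvProjT (r : List (Char × Char × Char)) : List Char := r.map (·.2.2)

-- the joint loop invariant: A's fold, started in a "previous midline not permitted" state,
-- appends exactly the runs of pvRunsB; started in a permitted state it first finishes the
-- current (last) contig with the leading permitted run.
lemma pv_core (cols : List (Char × Char × Char)) :
    (∀ (last : Option Char) (qa ta : List (List Char)), pvPermOpt last = false →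
      (cols.foldl pvStepA (last, qa, ta)).2
        = (qa ++ (pvRunsB cols).map pvProjQ, ta ++ (pvRunsB cols).map pvProjT)) ∧
    (∀ (c : Char) (qa ta : List (List Char)) (q t : List Char), pvPerm c = true →
      (cols.foldl pvStepA (some c, qa ++ [q], ta ++ [t])).2
        = (qa ++ (q ++ (cols.takeWhile (fun x => pvPerm x.2.1)).map (·.1))
                :: (pvRunsB (cols.dropWhile (fun x => pvPerm x.2.1))).map pvProjQ,
           ta ++ (t ++ (cols.takeWhile (fun x => pvPerm x.2.1)).map (·.2.2))
                :: (pvRunsB (cols.dropWhile (fun x => pvPerm x.2.1))).map pvProjT)) := by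
  induction cols with
  | nil =>
    refine ⟨?_, ?_⟩
    · intro last qa ta _; simp [pvRunsB]
    · intro c qa ta q t _; simp [pvRunsB]
  | cons c0 cs ih =>
    obtain ⟨ih1, ih2⟩ := ih
    constructor
    · intro last qa ta hlast
      by_cases hp : pvPerm c0.2.1 = true
      · have hstep : pvStepA (last, qa, ta) c0 = (some c0.2.1, qa ++ [[c0.1]], ta ++ [[c0.2.2]]) := by
          cases last with
          | none => simp [pvStepA, hp]
          | some l =>
            have hl : pvPerm l = false := hlast
            simp [pvStepA, hp, hl]
        rw [List.foldl_cons, hstep, ih2 c0.2.1 qa ta [c0.1] [c0.2.2] hp]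
        simp [pvRunsB, hp, pvProjQ, pvProjT]
      · have hp' : pvPerm c0.2.1 = false := by simpa using hp
        have hstep : pvStepA (last, qa, ta) c0 = (some c0.2.1, qa, ta) := by
          cases last with
          | none => simp [pvStepA, hp']
          | some l =>
            have hl : pvPerm l = false := hlast
            simp [pvStepA, hp', hl]
        rw [List.foldl_cons, hstep, ih1 (some c0.2.1) qa ta (by simpa [pvPermOpt] using hp')]
        simp [pvRunsB, hp']
    · intro c qa ta q t hc
      by_cases hp : pvPerm c0.2.1 = true
      · have hstep : pvStepA (some c, qa ++ [q], ta ++ [t]) c0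
            = (some c0.2.1, qa ++ [q ++ [c0.1]], ta ++ [t ++ [c0.2.2]]) := by
          simp [pvStepA, hp, hc, pvExtendLast_append]
        rw [List.foldl_cons, hstep, ih2 c0.2.1 qa ta (q ++ [c0.1]) (t ++ [c0.2.2]) hp]
        simp [hp]
      · have hp' : pvPerm c0.2.1 = false := by simpa using hp
        have hstep : pvStepA (some c, qa ++ [q], ta ++ [t]) c0
            = (some c0.2.1, qa ++ [q], ta ++ [t]) := by
          simp [pvStepA, hp', hc]
        rw [List.foldl_cons, hstep, ih1 (some c0.2.1) (qa ++ [q]) (ta ++ [t]) (by simpa [pvPermOpt] using hp')]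
        simp [pvRunsB, hp']

-- ===== VERDICT (by name: the statement is the Claim_ definition above) =====
theorem get_aligned_contig_sequences_spec : Claim_equal_get_aligned_contig_sequences := by
  intro alignmentlines minlength _ _
  unfold Spec_get_aligned_contig_sequences
  unfold get_aligned_contig_sequences get_aligned_contig_sequences_alt
  rw [pv_colsB_eq alignmentlines minlength ‹_›]
  have h := (pv_core (pvCols alignmentlines)).1 none [] [] rfl
  have hq : ((pvCols alignmentlines).foldl pvStepA (none, [], [])).2.1
      = (pvRunsB (pvCols alignmentlines)).map pvProjQ := by
    have := congrArg Prod.fst h; simpa using this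
  have ht : ((pvCols alignmentlines).foldl pvStepA (none, [], [])).2.2
      = (pvRunsB (pvCols alignmentlines)).map pvProjT := by
    have := congrArg Prod.snd h; simpa using this
  simp only [hq, ht]
  rfl
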